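-- pv_equiv track=rewrite | github.com/andcavan/app-meccanica | APP-CALCOLI/calcoli_manager/db_tolleranze.py | _split_iso_code
-- ===== SOURCE A (Python) =====
-- def _split_iso_code(code: str) -> tuple[str, str]:
--     txt = code.strip()
--     if not txt:
--         return "", ""
--     i = len(txt) - 1
--     while i >= 0 and txt[i].isdigit():
--         i -= 1
--     letter = txt[: i + 1]
--     grade = txt[i + 1 :]
--     return letter, grade
-- ===== SOURCE B (Python) =====
-- def _split_iso_code(code: str) -> tuple[str, str]:
--     txt = code.strip()
--     cut = 0
--     for j, ch in enumerate(txt):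
--         if not ch.isdigit():
--             cut = j + 1
--     return txt[:cut], txt[cut:]
-- ===== Notes on version B (the rewrite author's own statement) =====
-- stated objective: simpler
-- what changed: Replaced the backward while-loop with index arithmetic and the empty-string special case by a single forward pass that tracks the position just past the last non-digit character, then slices there; the empty and all-digit cases fall out without special-casing.
import Mathlib
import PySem

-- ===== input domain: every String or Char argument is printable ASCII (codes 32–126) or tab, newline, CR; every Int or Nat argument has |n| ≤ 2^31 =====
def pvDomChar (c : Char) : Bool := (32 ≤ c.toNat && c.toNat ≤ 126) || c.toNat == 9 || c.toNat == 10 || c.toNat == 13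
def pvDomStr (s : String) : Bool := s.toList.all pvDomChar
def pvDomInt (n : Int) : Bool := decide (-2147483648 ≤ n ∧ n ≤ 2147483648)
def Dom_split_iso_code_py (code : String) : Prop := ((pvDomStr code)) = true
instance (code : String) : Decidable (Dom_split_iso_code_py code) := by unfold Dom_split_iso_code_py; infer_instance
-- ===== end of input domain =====

-- B replaces A's backward while-loop and empty-string special case by one forward pass
-- tracking the position just past the last non-digit character (objective: simpler).

-- ===== PORT A =====
-- the `while i >= 0 and txt[i].isdigit(): i -= 1` loop of A
def splitALoop (txt : List Char) (i : Int) : Int :=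
  if h : 0 ≤ i ∧ ((PySem.List.pyGet? txt i).map PySem.Chars.isdigit).getD false = true then
    splitALoop txt (i - 1)
  else i
termination_by (i + 1).toNat
decreasing_by omega

def split_iso_code_py (code : String) : String × String :=
  let txt := PySem.Str.strip code
  if txt = "" then ("", "")
  else
    let i := splitALoop txt.toList ((PySem.Str.len txt : Int) - 1)
    (PySem.Str.slice txt none (some (i + 1)), PySem.Str.slice txt (some (i + 1)) none)

-- ===== PORT B =====
def split_iso_code_py_alt (code : String) : String × String :=
  let txt := PySem.Str.strip code
  let cut : Int := (PySem.List.enumerate txt.toList 0).foldl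
      (fun cut p => if PySem.Chars.isdigit p.2 = false then p.1 + 1 else cut) 0
  (PySem.Str.slice txt none (some cut), PySem.Str.slice txt (some cut) none)

-- ===== PRECONDITION & SPEC =====
def Spec_split_iso_code_py (code : String) (out : String × String) : Prop := out = split_iso_code_py_alt code
instance (code : String) (out : String × String) : Decidable (Spec_split_iso_code_py code out) := by unfold Spec_split_iso_code_py; infer_instance

-- ===== CLAIM (what is proved, stated in full; the proofs are below) =====
def Claim_equal_split_iso_code_py : Prop := ∀ (code : String), Dom_split_iso_code_py code → Spec_split_iso_code_py code (split_iso_code_py code)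

-- ===== LEMMAS AND PROOFS =====

-- B's fold computes length minus the length of the trailing digit run
theorem cutB_eq (s : List Char) :
    (PySem.List.enumerate s 0).foldl
      (fun cut p => if PySem.Chars.isdigit p.2 = false then p.1 + 1 else cut) (0 : Int)
    = (s.length : Int) - ((s.reverse.takeWhile PySem.Chars.isdigit).length : Int) := by
  induction s using List.reverseRecOn with
  | nil => simp [PySem.List.enumerate]
  | append_singleton s c ih =>
    rw [PySem.List.enumerate_append]
    simp only [List.foldl_append, ih, List.reverse_append, PySem.List.enumerate, List.foldl_cons, List.foldl_nil]
    by_cases hd : PySem.Chars.isdigit c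
    · simp [hd]
    · simp [hd]

-- appending past the scanned range does not change A's loop
theorem splitALoop_append (s : List Char) (c : Char) (i : Int) (hi : i < (s.length : Int)) :
    splitALoop (s ++ [c]) i = splitALoop s i := by
  by_cases h0 : 0 ≤ i
  · have hkey : (PySem.List.pyGet? (s ++ [c]) i) = PySem.List.pyGet? s i := by
      have hnat : i = ((i.toNat : Nat) : Int) := by omega
      rw [hnat, PySem.List.pyGet?_natCast, PySem.List.pyGet?_natCast]
      rw [List.getElem?_append_left (by omega)]
    conv_lhs => rw [splitALoop]
    conv_rhs => rw [splitALoop]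
    rw [hkey]
    by_cases hcond : 0 ≤ i ∧ (Option.map PySem.Chars.isdigit (PySem.List.pyGet? s i)).getD false = true
    · rw [dif_pos hcond, dif_pos hcond]
      exact splitALoop_append s c (i - 1) (by omega)
    · rw [dif_neg hcond, dif_neg hcond]
  · conv_lhs => rw [splitALoop]
    conv_rhs => rw [splitALoop]
    simp [h0]
termination_by (i + 1).toNat
decreasing_by omega

-- A's loop lands one below length minus the trailing digit run
theorem splitALoop_eq (s : List Char) :
    splitALoop s ((s.length : Int) - 1)
    = (s.length : Int) - ((s.reverse.takeWhile PySem.Chars.isdigit).length : Int) - 1 := by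
  induction s using List.reverseRecOn with
  | nil => rw [splitALoop]; simp
  | append_singleton s c ih =>
    have hget : PySem.List.pyGet? (s ++ [c]) (s.length : Int) = some c := by
      rw [PySem.List.pyGet?_natCast]
      simp
    have hlen : (((s ++ [c]).length : Int) - 1) = (s.length : Int) := by simp
    rw [hlen, splitALoop, hget]
    by_cases hd : PySem.Chars.isdigit c
    · simp only [hd, Option.map_some, Option.getD_some, and_true]
      rw [dif_pos (by positivity)]
      rw [splitALoop_append s c _ (by omega), ih]
      simp [hd]
    · rw [dif_neg (by simp [hd])]
      simp [hd]

-- ===== VERDICT (by name: the statement is the Claim_ definition above) =====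
theorem split_iso_code_py_spec : Claim_equal_split_iso_code_py := by
  intro code _
  unfold Spec_split_iso_code_py split_iso_code_py split_iso_code_py_alt
  simp only [cutB_eq]
  by_cases h : PySem.Str.strip code = ""
  · rw [h]; decide
  · rw [if_neg h]
    have hlen : PySem.Str.len (PySem.Str.strip code) = ((PySem.Str.strip code).toList.length : Int) := by
      simp [PySem.Str.len]
    rw [hlen, splitALoop_eq]
    have : (((PySem.Str.strip code).toList.length : Int)
        - (((PySem.Str.strip code).toList.reverse.takeWhile PySem.Chars.isdigit).length : Int) - 1) + 1
        = (((PySem.Str.strip code).toList.length : Int)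
        - (((PySem.Str.strip code).toList.reverse.takeWhile PySem.Chars.isdigit).length : Int)) := by ring
    rw [this]
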